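-- pv_equiv track=rewrite | github.com/Anogio/halfway | backend/src/transit_backend/core/isochrone_polygons.py | _boundary_edges
-- ===== SOURCE A (Python) =====
-- def _boundary_edges(cells: set[tuple[int, int]]) -> set[tuple[tuple[int, int], tuple[int, int]]]:
--     edges: set[tuple[tuple[int, int], tuple[int, int]]] = set()
--     for row, col in cells:
--         south_neighbor = (row - 1, col)
--         east_neighbor = (row, col + 1)
--         north_neighbor = (row + 1, col)
--         west_neighbor = (row, col - 1)
--
--         # x = column, y = row on integer lattice.
--         if south_neighbor not in cells:
--             edges.add(((col, row), (col + 1, row)))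
--         if east_neighbor not in cells:
--             edges.add(((col + 1, row), (col + 1, row + 1)))
--         if north_neighbor not in cells:
--             edges.add(((col + 1, row + 1), (col, row + 1)))
--         if west_neighbor not in cells:
--             edges.add(((col, row + 1), (col, row)))
--     return edges
-- ===== SOURCE B (Python) =====
-- def _boundary_edges(cells: set[tuple[int, int]]) -> set[tuple[tuple[int, int], tuple[int, int]]]:
--     # Emit all four oriented edges of every cell; an interior edge is emitted by
--     # both of its owning cells and cancels under its canonical (unordered) key.
--     pending: dict = {}
--     for row, col in cells:
--         for edge in (
--             ((col, row), (col + 1, row)),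
--             ((col + 1, row), (col + 1, row + 1)),
--             ((col + 1, row + 1), (col, row + 1)),
--             ((col, row + 1), (col, row)),
--         ):
--             key = frozenset(edge)
--             if key in pending:
--                 del pending[key]
--             else:
--                 pending[key] = edge
--     return set(pending.values())
-- ===== Notes on version B (the rewrite author's own statement) =====
-- stated objective: alternative
-- what changed: Instead of testing the four neighbours of each cell against the set, B emits all four oriented edges of every cell into a dict keyed by the canonical unordered edge (frozenset), deleting a key when it is seen a second time, so each interior edge cancels with its twin and only boundary edges survive.
import Mathlib
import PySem

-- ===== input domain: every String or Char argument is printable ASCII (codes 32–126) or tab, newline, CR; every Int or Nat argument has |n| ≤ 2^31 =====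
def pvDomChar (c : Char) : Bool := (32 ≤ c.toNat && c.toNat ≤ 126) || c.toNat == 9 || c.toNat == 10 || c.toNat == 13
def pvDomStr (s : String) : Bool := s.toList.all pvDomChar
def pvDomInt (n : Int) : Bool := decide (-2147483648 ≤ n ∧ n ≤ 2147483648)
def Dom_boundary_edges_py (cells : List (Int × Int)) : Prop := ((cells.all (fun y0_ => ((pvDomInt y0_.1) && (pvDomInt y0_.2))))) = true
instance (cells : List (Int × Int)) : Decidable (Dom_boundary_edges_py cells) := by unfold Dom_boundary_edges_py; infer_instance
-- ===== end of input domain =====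

-- B replaces the four per-cell neighbour tests by emitting all four oriented edges of
-- every cell into a dict keyed by the canonical (unordered) edge, cancelling each
-- interior edge when its second owner emits it (objective: alternative decomposition).

-- ===== PORT A =====
def boundary_edges_py (cells : List (Int × Int)) : List ((Int × Int) × (Int × Int)) :=
  cells.foldl (fun edges rc =>
    let row := rc.1
    let col := rc.2
    let south_neighbor := (row - 1, col)
    let east_neighbor := (row, col + 1)
    let north_neighbor := (row + 1, col)
    let west_neighbor := (row, col - 1)
    let edges := if PySem.Set.contains cells south_neighbor then edges
                 else PySem.Set.add edges ((col, row), (col + 1, row))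
    let edges := if PySem.Set.contains cells east_neighbor then edges
                 else PySem.Set.add edges ((col + 1, row), (col + 1, row + 1))
    let edges := if PySem.Set.contains cells north_neighbor then edges
                 else PySem.Set.add edges ((col + 1, row + 1), (col, row + 1))
    let edges := if PySem.Set.contains cells west_neighbor then edges
                 else PySem.Set.add edges ((col, row + 1), (col, row))
    edges) PySem.Set.empty

-- ===== PORT B =====
-- key = frozenset(edge): the unordered pair of endpoints, canonicalised by sorting them
def canonEdge (e : (Int × Int) × (Int × Int)) : (Int × Int) × (Int × Int) :=
  if e.2.1 < e.1.1 ∨ (e.2.1 = e.1.1 ∧ e.2.2 < e.1.2) then (e.2, e.1) else e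

-- the literal 4-tuple of oriented edges Source B emits for one cell
def cellEdges (rc : Int × Int) : List ((Int × Int) × (Int × Int)) :=
  [((rc.2, rc.1), (rc.2 + 1, rc.1)),
   ((rc.2 + 1, rc.1), (rc.2 + 1, rc.1 + 1)),
   ((rc.2 + 1, rc.1 + 1), (rc.2, rc.1 + 1)),
   ((rc.2, rc.1 + 1), (rc.2, rc.1))]

def boundary_edges_py_alt (cells : List (Int × Int)) : List ((Int × Int) × (Int × Int)) :=
  PySem.Set.ofList
    ((cells.foldl (fun pending rc =>
        (cellEdges rc).foldl (fun pending e =>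
          let key := canonEdge e
          if pending.contains key then pending.erase key else pending.insert key e)
          pending)
      (PySem.Dict.empty : PySem.Dict ((Int × Int) × (Int × Int)) ((Int × Int) × (Int × Int)))).values)

-- ===== PRECONDITION & SPEC =====
-- The Python argument is a set; its List encoding holds distinct elements, so Pre_
-- only states that the list is a faithful encoding of a set (no duplicates).
def Pre_boundary_edges_py (cells : List (Int × Int)) : Prop := cells.Nodup
instance (cells : List (Int × Int)) : Decidable (Pre_boundary_edges_py cells) := by
  unfold Pre_boundary_edges_py; infer_instance

def pvWitness_boundary_edges_py : (List (Int × Int)) := [(0, 0), (0, 1)]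

def Spec_boundary_edges_py (cells : List (Int × Int)) (out : List ((Int × Int) × (Int × Int))) : Prop := out = boundary_edges_py_alt cells
instance (cells : List (Int × Int)) (out : List ((Int × Int) × (Int × Int))) : Decidable (Spec_boundary_edges_py cells out) := by unfold Spec_boundary_edges_py; infer_instance

-- ===== CLAIM (what is proved, stated in full; the proofs are below) =====
def Claim_equal_boundary_edges_py : Prop := ∀ (cells : List (Int × Int)), Dom_boundary_edges_py cells → Pre_boundary_edges_py cells → Spec_boundary_edges_py cells (boundary_edges_py cells)

-- ===== LEMMAS AND PROOFS =====

-- the four (oriented edge, neighbour tested by A) pairs of a cell, in A's order S,E,N,W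
def sidesL (rc : Int × Int) : List ((((Int × Int) × (Int × Int))) × (Int × Int)) :=
  [(((rc.2, rc.1), (rc.2 + 1, rc.1)), (rc.1 - 1, rc.2)),
   (((rc.2 + 1, rc.1), (rc.2 + 1, rc.1 + 1)), (rc.1, rc.2 + 1)),
   (((rc.2 + 1, rc.1 + 1), (rc.2, rc.1 + 1)), (rc.1 + 1, rc.2)),
   (((rc.2, rc.1 + 1), (rc.2, rc.1)), (rc.1, rc.2 - 1))]

-- the common reference value: per cell, the edges whose tested neighbour is absent
def targetEdges (cells : List (Int × Int)) : List ((Int × Int) × (Int × Int)) :=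
  cells.flatMap (fun c =>
    ((sidesL c).filter (fun p => !(List.contains cells p.2))).map Prod.fst)

-- B's loop body on one emitted edge
def toggleStep (d : PySem.Dict ((Int × Int) × (Int × Int)) ((Int × Int) × (Int × Int)))
    (e : (Int × Int) × (Int × Int)) :
    PySem.Dict ((Int × Int) × (Int × Int)) ((Int × Int) × (Int × Int)) :=
  if d.contains (canonEdge e) then d.erase (canonEdge e) else d.insert (canonEdge e) e

-- which cell emits a given oriented edge (recovers the owner from the orientation)
def ownerCell (e : (Int × Int) × (Int × Int)) : Int × Int :=
  if e.2.1 = e.1.1 + 1 then (e.1.2, e.1.1)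
  else if e.2.2 = e.1.2 + 1 then (e.1.2, e.1.1 - 1)
  else if e.2.1 = e.1.1 - 1 then (e.1.2 - 1, e.1.1 - 1)
  else (e.1.2 - 1, e.1.1)

lemma owner_cellEdges (rc : Int × Int) : ∀ e ∈ cellEdges rc, ownerCell e = rc := by
  obtain ⟨r, c⟩ := rc
  intro e he
  simp [cellEdges] at he
  rcases he with h | h | h | h <;> subst h <;>
    (simp only [ownerCell]; split_ifs <;> simp [Prod.ext_iff] at * <;> omega)

lemma nodup_cellEdges (rc : Int × Int) : (cellEdges rc).Nodup := by
  obtain ⟨r, c⟩ := rc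
  simp [cellEdges, Prod.ext_iff]

lemma nodup_flat (cells : List (Int × Int)) (h : cells.Nodup) :
    (cells.flatMap cellEdges).Nodup := by
  rw [List.nodup_flatMap]
  refine ⟨fun c _ => nodup_cellEdges c, ?_⟩
  refine h.imp ?_
  intro a b hab e hea heb
  exact absurd ((owner_cellEdges a e hea).symm.trans (owner_cellEdges b e heb)) hab

-- canonical keys of the four sides: a horizontal key H x y = ((x,y),(x+1,y)) for the
-- south/north sides, a vertical key V x y = ((x,y),(x,y+1)) for the east/west sides
lemma canon_e1 (r c : Int) : canonEdge ((c, r), (c + 1, r)) = ((c, r), (c + 1, r)) := by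
  simp only [canonEdge]; rw [if_neg (by omega)]
lemma canon_e2 (r c : Int) : canonEdge ((c + 1, r), (c + 1, r + 1)) = ((c + 1, r), (c + 1, r + 1)) := by
  simp only [canonEdge]; rw [if_neg (by omega)]
lemma canon_e3 (r c : Int) : canonEdge ((c + 1, r + 1), (c, r + 1)) = ((c, r + 1), (c + 1, r + 1)) := by
  simp only [canonEdge]; rw [if_pos (by omega)]
lemma canon_e4 (r c : Int) : canonEdge ((c, r + 1), (c, r)) = ((c, r), (c, r + 1)) := by
  simp only [canonEdge]; rw [if_pos (by norm_num)]

lemma canon_cellEdges (rc : Int × Int) :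
    (cellEdges rc).map canonEdge =
      [((rc.2, rc.1), (rc.2 + 1, rc.1)),
       ((rc.2 + 1, rc.1), (rc.2 + 1, rc.1 + 1)),
       ((rc.2, rc.1 + 1), (rc.2 + 1, rc.1 + 1)),
       ((rc.2, rc.1), (rc.2, rc.1 + 1))] := by
  obtain ⟨r, c⟩ := rc
  simp only [cellEdges, List.map]
  rw [canon_e1, canon_e2, canon_e3, canon_e4]

-- each horizontal key is emitted once by each of its two owning cells, and similarly
-- for vertical keys: the key counts over all emissions are cell counts
lemma count_keys_H (cells : List (Int × Int)) (x y : Int) :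
    ((cells.flatMap cellEdges).map canonEdge).count ((x, y), (x + 1, y)) =
      cells.count (y, x) + cells.count (y - 1, x) := by
  induction cells with
  | nil => simp
  | cons c cs ih =>
    obtain ⟨r, cc⟩ := c
    simp only [List.flatMap_cons, List.map_append, List.count_append, ih, canon_cellEdges,
      List.count_cons, List.count_nil]
    simp [Prod.ext_iff]
    split_ifs <;> omega

lemma count_keys_V (cells : List (Int × Int)) (x y : Int) :
    ((cells.flatMap cellEdges).map canonEdge).count ((x, y), (x, y + 1)) =
      cells.count (y, x - 1) + cells.count (y, x) := by
  induction cells with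
  | nil => simp
  | cons c cs ih =>
    obtain ⟨r, cc⟩ := c
    simp only [List.flatMap_cons, List.map_append, List.count_append, ih, canon_cellEdges,
      List.count_cons, List.count_nil]
    simp [Prod.ext_iff]
    split_ifs <;> omega

lemma count_if_contains (cells : List (Int × Int)) (h : cells.Nodup) (q : Int × Int) :
    cells.count q = if cells.contains q then 1 else 0 := by
  by_cases hq : q ∈ cells
  · simp [hq, List.count_eq_one_of_mem h hq]
  · simp [hq, List.count_eq_zero_of_not_mem hq]

lemma counts_le_two (cells : List (Int × Int)) (h : cells.Nodup) (k : (Int × Int) × (Int × Int)) :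
    (((cells.flatMap cellEdges).map canonEdge).count k) ≤ 2 := by
  obtain ⟨⟨a, b⟩, ⟨x, y⟩⟩ := k
  have hcnt := count_if_contains cells h
  by_cases hH : x = a + 1 ∧ y = b
  · have hk : ((a, b), (x, y)) = ((a, b), (a + 1, b)) := by rw [hH.1, hH.2]
    rw [hk, count_keys_H cells a b, hcnt, hcnt]
    split_ifs <;> omega
  · by_cases hV : x = a ∧ y = b + 1
    · have hk : ((a, b), (x, y)) = ((a, b), (a, b + 1)) := by rw [hV.1, hV.2]
      rw [hk, count_keys_V cells a b, hcnt, hcnt]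
      split_ifs <;> omega
    · rw [List.count_eq_zero_of_not_mem]
      · omega
      · intro hk
        obtain ⟨e, he, hek⟩ := List.mem_map.mp hk
        obtain ⟨c, hc, hec⟩ := List.mem_flatMap.mp he
        have hmm : canonEdge e ∈ (cellEdges c).map canonEdge := List.mem_map_of_mem hec
        rw [canon_cellEdges c, hek] at hmm
        obtain ⟨r', c'⟩ := c
        simp [Prod.ext_iff] at hmm
        omega

lemma any_key_of_count_one (es : List ((Int × Int) × (Int × Int))) (e : (Int × Int) × (Int × Int))
    (hc : (es.map canonEdge).count (canonEdge e) = 1) :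
    List.any ((es.filter (fun e => (es.map canonEdge).count (canonEdge e) == 1)).map
        (fun e => (canonEdge e, e))) (fun p => p.1 == canonEdge e) = true := by
  have hmem : canonEdge e ∈ es.map canonEdge := List.count_pos_iff.mp (by omega)
  obtain ⟨f, hf, hfe⟩ := List.mem_map.mp hmem
  rw [List.any_eq_true]
  exact ⟨(canonEdge f, f), List.mem_map_of_mem
    (List.mem_filter.mpr ⟨hf, by rw [beq_iff_eq, hfe, hc]⟩), by simp [hfe]⟩

lemma any_key_of_count_zero (es : List ((Int × Int) × (Int × Int))) (e : (Int × Int) × (Int × Int))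
    (hc : (es.map canonEdge).count (canonEdge e) = 0) :
    List.any ((es.filter (fun e => (es.map canonEdge).count (canonEdge e) == 1)).map
        (fun e => (canonEdge e, e))) (fun p => p.1 == canonEdge e) = false := by
  rw [List.any_eq_false]
  rintro ⟨k, v⟩ hm
  obtain ⟨f, hf, hpair⟩ := List.mem_map.mp hm
  obtain ⟨hfes, -⟩ := List.mem_filter.mp hf
  cases hpair
  simp only [beq_iff_eq]
  intro hke
  have hmem : canonEdge e ∈ es.map canonEdge := hke ▸ List.mem_map_of_mem hfes
  have := List.count_pos_iff.mpr hmem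
  omega

-- the toggle fold over any emission list with key-multiplicity ≤ 2 keeps exactly the
-- once-emitted edges, in emission order
lemma toggle_items (es : List ((Int × Int) × (Int × Int)))
    (h : ∀ k, ((es.map canonEdge).count k) ≤ 2) :
    (es.foldl toggleStep PySem.Dict.empty).items =
      (es.filter (fun e => (es.map canonEdge).count (canonEdge e) == 1)).map
        (fun e => (canonEdge e, e)) := by
  induction es using List.reverseRecOn with
  | nil => simp [PySem.Dict.empty]
  | append_singleton es e ih =>
    have h' : ∀ k, ((es.map canonEdge).count k) ≤ 2 := by
      intro k
      have := h k
      simp only [List.map_append, List.count_append] at this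
      omega
    have hD := ih h'
    have hle : (es.map canonEdge).count (canonEdge e) ≤ 1 := by
      have := h (canonEdge e)
      simp only [List.map_append, List.count_append, List.map_cons, List.map_nil,
        List.count_cons, List.count_nil, beq_self_eq_true, if_pos] at this
      omega
    rw [List.foldl_append, List.foldl_cons, List.foldl_nil]
    have hfull : ∀ x : (Int × Int) × (Int × Int),
        (((es ++ [e]).map canonEdge).count (canonEdge x)) =
          (es.map canonEdge).count (canonEdge x) +
            (if canonEdge x = canonEdge e then 1 else 0) := by
      intro x
      simp only [List.map_append, List.count_append, List.map_cons, List.map_nil,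
        List.count_cons, List.count_nil]
      by_cases hx : canonEdge x = canonEdge e
      · simp [hx]
      · have hx' : (canonEdge e == canonEdge x) = false := by
          rw [beq_eq_false_iff_ne]
          exact fun hh => hx hh.symm
        simp [hx, hx']
    by_cases hc : (es.map canonEdge).count (canonEdge e) = 1
    · -- second emission of this key: the pending entry is removed
      have hcont : (es.foldl toggleStep PySem.Dict.empty).contains (canonEdge e) = true := by
        simp only [PySem.Dict.contains, hD]
        exact any_key_of_count_one es e hc
      rw [toggleStep, if_pos hcont]
      have herase : ((es.foldl toggleStep PySem.Dict.empty).erase (canonEdge e)).items =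
          (es.foldl toggleStep PySem.Dict.empty).items.filter
            (fun p => !(p.1 == canonEdge e)) := rfl
      rw [herase, hD, List.filter_map, List.filter_filter]
      rw [List.filter_append]
      have htail : [e].filter (fun x => ((es ++ [e]).map canonEdge).count (canonEdge x) == 1)
          = [] := by
        simp only [List.filter, hfull e]
        rw [hc]
        rfl
      rw [htail, List.append_nil]
      congr 1
      apply List.filter_congr
      intro f _
      rw [hfull f]
      by_cases hfe : canonEdge f = canonEdge e
      · simp only [hfe, hc, Function.comp]
        simp
      · simp only [if_neg hfe, Function.comp]
        simp [hfe]
    · -- first emission of this key: appended at the end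
      have hc0 : (es.map canonEdge).count (canonEdge e) = 0 := by omega
      have hcont : (es.foldl toggleStep PySem.Dict.empty).contains (canonEdge e) = false := by
        simp only [PySem.Dict.contains, hD]
        exact any_key_of_count_zero es e hc0
      rw [toggleStep, if_neg (by simp [hcont])]
      rw [PySem.Dict.items_insert_of_not_contains _ _ hcont, hD]
      rw [List.filter_append]
      have htail : [e].filter (fun x => ((es ++ [e]).map canonEdge).count (canonEdge x) == 1)
          = [e] := by
        simp only [List.filter, hfull e, hc0]
        rfl
      rw [htail, List.map_append]
      congr 2
      apply List.filter_congr
      intro f hfes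
      rw [hfull f]
      have hfe : canonEdge f ≠ canonEdge e := by
        intro hke
        have := List.count_pos_iff.mpr (hke ▸ List.mem_map_of_mem hfes (f := canonEdge))
        omega
      simp [hfe]

-- a key survives exactly when the tested neighbour is absent from the (duplicate-free) set
lemma filter_cellEdges (cells : List (Int × Int)) (h : cells.Nodup) (r c : Int)
    (hmem : (r, c) ∈ cells) :
    (cellEdges (r, c)).filter
        (fun e => ((cells.flatMap cellEdges).map canonEdge).count (canonEdge e) == 1) =
      ((sidesL (r, c)).filter (fun p => !(List.contains cells p.2))).map Prod.fst := by
  have k1 := count_keys_H cells c r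
  have k3 := count_keys_H cells c (r + 1)
  have k2 := count_keys_V cells (c + 1) r
  have k4 := count_keys_V cells c r
  have hcmem : cells.count (r, c) = 1 := List.count_eq_one_of_mem h hmem
  have harr1 : (r + 1 - 1 : Int) = r := by ring
  have harr2 : (c + 1 - 1 : Int) = c := by ring
  rw [harr1] at k3
  rw [harr2] at k2
  by_cases h1 : (r - 1, c) ∈ cells <;> by_cases h2 : (r, c + 1) ∈ cells <;>
    by_cases h3 : (r + 1, c) ∈ cells <;> by_cases h4 : (r, c - 1) ∈ cells <;>
    simp [cellEdges, sidesL, canon_e1, canon_e2, canon_e3, canon_e4, k1, k2, k3, k4,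
      hcmem, count_if_contains cells h, h1, h2, h3, h4]

lemma filter_eq_target (cells : List (Int × Int)) (h : cells.Nodup) :
    (cells.flatMap cellEdges).filter
        (fun e => ((cells.flatMap cellEdges).map canonEdge).count (canonEdge e) == 1) =
      targetEdges cells := by
  rw [List.filter_flatMap]
  unfold targetEdges
  apply List.flatMap_congr
  intro c hc
  obtain ⟨r, cc⟩ := c
  exact filter_cellEdges cells h r cc hc

lemma nodup_target (cells : List (Int × Int)) (h : cells.Nodup) :
    (targetEdges cells).Nodup := by
  rw [← filter_eq_target cells h]
  exact (nodup_flat cells h).filter _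

lemma values_eq_target (cells : List (Int × Int)) (h : cells.Nodup) :
    (cells.foldl (fun pending rc =>
        (cellEdges rc).foldl (fun pending e =>
          let key := canonEdge e
          if pending.contains key then pending.erase key else pending.insert key e)
          pending)
      (PySem.Dict.empty : PySem.Dict ((Int × Int) × (Int × Int)) ((Int × Int) × (Int × Int)))).values
      = targetEdges cells := by
  show (cells.foldl (fun pending rc => (cellEdges rc).foldl toggleStep pending)
      PySem.Dict.empty).values = targetEdges cells
  rw [← List.foldl_flatMap]
  show ((cells.flatMap cellEdges).foldl toggleStep PySem.Dict.empty).items.map (fun p => p.2)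
      = targetEdges cells
  rw [toggle_items _ (counts_le_two cells h), List.map_map]
  have hid : ((fun (p : ((Int × Int) × (Int × Int)) × ((Int × Int) × (Int × Int))) => p.2) ∘
      (fun e => (canonEdge e, e))) = id := rfl
  rw [hid, List.map_id]
  exact filter_eq_target cells h

lemma a_eq_target (cells : List (Int × Int)) (h : cells.Nodup) :
    boundary_edges_py cells = targetEdges cells := by
  have hstep : (fun (edges : List ((Int × Int) × (Int × Int))) rc =>
      (((sidesL rc).filter (fun p => !(List.contains cells p.2))).map Prod.fst).foldl
        PySem.Set.add edges) =
      (fun (edges : List ((Int × Int) × (Int × Int))) (rc : Int × Int) =>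
        let row := rc.1
        let col := rc.2
        let south_neighbor := (row - 1, col)
        let east_neighbor := (row, col + 1)
        let north_neighbor := (row + 1, col)
        let west_neighbor := (row, col - 1)
        let edges := if PySem.Set.contains cells south_neighbor then edges
                    else PySem.Set.add edges ((col, row), (col + 1, row))
        let edges := if PySem.Set.contains cells east_neighbor then edges
                    else PySem.Set.add edges ((col + 1, row), (col + 1, row + 1))
        let edges := if PySem.Set.contains cells north_neighbor then edges
                    else PySem.Set.add edges ((col + 1, row + 1), (col, row + 1))
        let edges := if PySem.Set.contains cells west_neighbor then edges
                    else PySem.Set.add edges ((col, row + 1), (col, row))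
        edges) := by
    funext edges rc
    simp only [List.foldl_map, List.foldl_filter, sidesL, List.foldl_cons, List.foldl_nil]
    simp only [PySem.Set.contains]
    have ifswap : ∀ (b : Bool) (x y : List ((Int × Int) × (Int × Int))),
        (if (!b) = true then x else y) = (if b = true then y else x) := by
      intro b x y; cases b <;> simp
    simp only [ifswap]
    rfl
  unfold boundary_edges_py
  rw [← hstep, ← List.foldl_flatMap]
  show List.foldl PySem.Set.add ([] : List ((Int × Int) × (Int × Int))) (targetEdges cells)
      = targetEdges cells
  rw [← PySem.Set.ofList_eq_foldl]
  exact PySem.Set.ofList_eq_self_of_nodup _ (nodup_target cells h)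

-- ===== VERDICT (by name: the statement is the Claim_ definition above) =====
theorem boundary_edges_py_spec : Claim_equal_boundary_edges_py := by
  intro cells _ hpre
  unfold Spec_boundary_edges_py boundary_edges_py_alt
  rw [values_eq_target cells hpre, PySem.Set.ofList_eq_self_of_nodup _ (nodup_target cells hpre),
    a_eq_target cells hpre]
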